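-- pv_equiv track=rewrite | github.com/Pansartaxen/DV2599_ML | Ass2/main.py | create_buckets
-- ===== SOURCE A (Python) =====
-- def create_buckets(vector, classes):
--     """Returns the data in 10 buckets"""
--
--     train_vector = vector.copy()
--     train_classes = classes.copy()
--
--     bucket_train_vector = []
--     bucket_train_classes = []
--     for i in range(0,10):
--         bucket_train_vector.append(list(train_vector[i::10]))
--         bucket_train_classes.append(list(train_classes[i::10]))
--
--     return bucket_train_vector, bucket_train_classes
-- ===== SOURCE B (Python) =====
-- def _scatter(xs):
--     buckets = [[] for _ in range(10)]
--     for idx, value in enumerate(xs):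
--         buckets[idx % 10].append(value)
--     return buckets
--
--
-- def create_buckets(vector, classes):
--     """Returns the data in 10 buckets"""
--     return _scatter(vector), _scatter(classes)
-- ===== Notes on version B (the rewrite author's own statement) =====
-- stated objective: alternative
-- what changed: Instead of gathering ten strided slices vector[i::10] (ten passes per list), B scatters each element into bucket idx % 10 in a single forward pass over each list.
import Mathlib
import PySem

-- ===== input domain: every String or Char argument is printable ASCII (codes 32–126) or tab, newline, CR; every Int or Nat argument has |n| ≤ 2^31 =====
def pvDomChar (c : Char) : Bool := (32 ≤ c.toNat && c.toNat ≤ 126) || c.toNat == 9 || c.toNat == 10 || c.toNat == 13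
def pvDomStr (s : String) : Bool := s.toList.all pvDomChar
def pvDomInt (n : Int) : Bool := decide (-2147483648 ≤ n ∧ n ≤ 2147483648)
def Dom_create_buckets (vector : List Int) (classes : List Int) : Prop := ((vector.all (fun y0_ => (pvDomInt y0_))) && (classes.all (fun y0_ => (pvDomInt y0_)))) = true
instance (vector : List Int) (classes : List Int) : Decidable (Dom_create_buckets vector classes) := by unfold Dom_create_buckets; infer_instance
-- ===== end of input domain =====

-- B scatters each element into bucket idx % 10 in one forward pass per list, instead of
-- gathering ten strided slices xs[i::10]; same cost, different decomposition.


-- ===== PORT A =====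
-- xs[i::10]; the step is the literal 10 ≠ 0, so slice? is always `some` and the getD [] is unreachable
def pyStrideSlice (xs : List Int) (i : Int) : List Int :=
  (PySem.List.slice? xs (some i) none 10).getD []

def create_buckets (vector : List Int) (classes : List Int) : List (List Int) × List (List Int) :=
  let train_vector := vector            -- vector.copy()
  let train_classes := classes          -- classes.copy()
  let p := (PySem.List.pyRange 0 10 1).foldl
    (fun (acc : List (List Int) × List (List Int)) i =>
      (acc.1 ++ [pyStrideSlice train_vector i],
       acc.2 ++ [pyStrideSlice train_classes i]))
    ([], [])
  (p.1, p.2)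

-- ===== PORT B =====
-- buckets[idx % 10].append(value)
def scatterStep (buckets : List (List Int)) (p : Int × Int) : List (List Int) :=
  buckets.modify (PySem.Int.mod p.1 10).toNat (fun b => b ++ [p.2])

-- _scatter: buckets = [[] for _ in range(10)]; for idx, value in enumerate(xs): …
def scatter (xs : List Int) : List (List Int) :=
  (PySem.List.enumerate xs 0).foldl scatterStep (List.replicate 10 [])

def create_buckets_alt (vector : List Int) (classes : List Int) : List (List Int) × List (List Int) :=
  (scatter vector, scatter classes)

-- ===== PRECONDITION & SPEC =====
def Spec_create_buckets (vector : List Int) (classes : List Int) (out : List (List Int) × List (List Int)) : Prop := out = create_buckets_alt vector classes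
instance (vector : List Int) (classes : List Int) (out : List (List Int) × List (List Int)) : Decidable (Spec_create_buckets vector classes out) := by unfold Spec_create_buckets; infer_instance

-- ===== CLAIM (what is proved, stated in full; the proofs are below) =====
def Claim_equal_create_buckets : Prop := ∀ (vector : List Int) (classes : List Int), Dom_create_buckets vector classes → Spec_create_buckets vector classes (create_buckets vector classes)

-- ===== LEMMAS AND PROOFS =====

-- elements of xs at indices j, j+10, j+20, …, by one-step rotation of the residue
def strided : List Int → Nat → List Int
  | [], _ => []
  | x :: xs, 0 => x :: strided xs 9
  | _ :: xs, j+1 => strided xs j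

-- elements of xs whose absolute index (starting at i) is ≡ j (mod 10), in order
def pickAbs : List Int → Nat → Nat → List Int
  | [], _, _ => []
  | x :: xs, i, j => (if i % 10 = j then [x] else []) ++ pickAbs xs (i+1) j

lemma slice?_stride_closed (xs : List Int) (j : Nat) :
    PySem.List.slice? xs (some (j:Int)) none 10 =
      some (List.filterMap (fun k => xs[(min j xs.length + 10*k : Nat)]?)
        (List.range (if j < xs.length then (xs.length - j + 9)/10 else 0))) := by
  simp only [PySem.List.slice?, PySem.List.sliceIndices]
  norm_num
  simp only [show ¬((j:Int) < 0) from by omega, if_false]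
  have hc : (if (min (↑j:Int) ↑xs.length) < (↑xs.length:Int) then
      (((↑xs.length:Int) - min (↑j:Int) ↑xs.length + 10 - 1) / 10).toNat else 0)
      = (if j < xs.length then (xs.length - j + 9)/10 else 0) := by
    split_ifs <;> omega
  have hf : (fun x : Nat => xs[((min (↑j:Int) ↑xs.length) + 10 * (x:Int)).toNat]?)
      = (fun k : Nat => xs[(min j xs.length + 10*k : Nat)]?) := by
    funext k; congr 1; omega
  rw [hc, hf]

lemma filterMap_stride_eq_strided (xs : List Int) : ∀ j : Nat, j < 10 →
    List.filterMap (fun k => xs[(min j xs.length + 10*k : Nat)]?)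
      (List.range (if j < xs.length then (xs.length - j + 9)/10 else 0))
      = strided xs j := by
  induction xs with
  | nil =>
    intro j hj
    simp [strided]
  | cons x xs ih =>
    intro j hj
    match j with
    | 0 =>
      have hcnt : (if 0 < (x :: xs).length then ((x :: xs).length - 0 + 9)/10 else 0)
          = ((if 9 < xs.length then (xs.length - 9 + 9)/10 else 0)) + 1 := by
        simp only [List.length_cons]; split_ifs <;> omega
      rw [hcnt, List.range_succ_eq_map, List.filterMap_cons, List.filterMap_map]
      have h0 : (x :: xs)[(min 0 (x :: xs).length + 10*0 : Nat)]? = some x := by simp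
      rw [h0]
      have hf : ((fun k => (x :: xs)[(min 0 (x :: xs).length + 10*k : Nat)]?) ∘ Nat.succ)
          = (fun k => xs[(min 9 xs.length + 10*k : Nat)]?) := by
        funext k
        show (x :: xs)[(min 0 (x :: xs).length + 10*(k+1) : Nat)]? = xs[(min 9 xs.length + 10*k : Nat)]?
        by_cases h9 : 9 ≤ xs.length
        · have h1 : min 0 (x :: xs).length + 10*(k+1) = (min 9 xs.length + 10*k) + 1 := by
            simp only [List.length_cons]; omega
          rw [h1, List.getElem?_cons_succ]
        · rw [List.getElem?_eq_none (by simp only [List.length_cons]; omega),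
              List.getElem?_eq_none (by omega)]
      rw [hf, ih 9 (by omega), strided]
    | j+1 =>
      have hcnt : (if j+1 < (x :: xs).length then ((x :: xs).length - (j+1) + 9)/10 else 0)
          = (if j < xs.length then (xs.length - j + 9)/10 else 0) := by
        simp only [List.length_cons]; split_ifs <;> omega
      have hf : (fun k => (x :: xs)[(min (j+1) (x :: xs).length + 10*k : Nat)]?)
          = (fun k => xs[(min j xs.length + 10*k : Nat)]?) := by
        funext k
        have : min (j+1) (x :: xs).length + 10*k = (min j xs.length + 10*k) + 1 := by
          simp only [List.length_cons]; omega
        rw [this, List.getElem?_cons_succ]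
      rw [hcnt, hf, ih j (by omega), strided]

lemma pyStrideSlice_eq_strided (xs : List Int) (j : Nat) (hj : j < 10) :
    pyStrideSlice xs (j : Int) = strided xs j := by
  unfold pyStrideSlice
  rw [slice?_stride_closed, Option.getD_some, filterMap_stride_eq_strided xs j hj]

lemma pickAbs_eq_strided (xs : List Int) : ∀ (i j : Nat), j < 10 →
    pickAbs xs i j = strided xs ((j + 10 - i % 10) % 10) := by
  induction xs with
  | nil => intro i j _; simp [pickAbs, strided]
  | cons x xs ih =>
    intro i j hj
    by_cases h : i % 10 = j
    · have hr : (j + 10 - i % 10) % 10 = 0 := by omega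
      rw [pickAbs, if_pos h, hr, strided]
      have hr' : (j + 10 - (i+1) % 10) % 10 = 9 := by omega
      rw [ih (i+1) j hj, hr']
      simp
    · obtain ⟨r, hr⟩ : ∃ r, (j + 10 - i % 10) % 10 = r + 1 := by
        refine ⟨(j + 10 - i % 10) % 10 - 1, ?_⟩; omega
      rw [pickAbs, if_neg h, hr, strided]
      have hr' : (j + 10 - (i+1) % 10) % 10 = r := by omega
      rw [ih (i+1) j hj, hr']
      simp

lemma scatter_inv (xs : List Int) : ∀ (i : Nat) (B : List (List Int)), B.length = 10 →
    (PySem.List.enumerate xs (i : Int)).foldl scatterStep B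
      = (List.range 10).map (fun j => B.getD j [] ++ pickAbs xs i j) := by
  induction xs with
  | nil =>
    intro i B hB
    simp only [PySem.List.enumerate, List.foldl_nil, pickAbs, List.append_nil]
    refine List.ext_getElem (by simp [hB]) ?_
    intro k hk _
    simp [List.getD_eq_getElem?_getD, List.getElem?_eq_getElem (by omega : k < B.length)]
  | cons x xs ih =>
    intro i B hB
    rw [show PySem.List.enumerate (x :: xs) (i : Int)
          = ((i : Int), x) :: PySem.List.enumerate xs ((i : Int) + 1) from rfl,
        show ((i : Int) + 1) = (((i + 1 : Nat)) : Int) by push_cast; ring,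
        List.foldl_cons]
    rw [ih (i+1) (scatterStep B ((i : Int), x)) (by simp [scatterStep, hB])]
    refine List.map_congr_left ?_
    intro j hj
    have hj10 : j < 10 := by simpa using hj
    have hmod : (PySem.Int.mod (i : Int) 10).toNat = i % 10 := by
      have h : PySem.Int.mod (i : Int) 10 = ((i % 10 : Nat) : Int) := by
        exact_mod_cast PySem.Int.mod_natCast i 10
      omega
    have hget : (scatterStep B ((i : Int), x)).getD j []
        = if i % 10 = j then B.getD j [] ++ [x] else B.getD j [] := by
      simp only [scatterStep, hmod, List.getD_eq_getElem?_getD, List.getElem?_modify]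
      have hBj : B[j]? = some (B[j]'(by omega)) := List.getElem?_eq_getElem (by omega)
      split_ifs with h <;> simp [hBj]
    rw [hget, pickAbs]
    split_ifs with h <;> simp

lemma scatter_eq (xs : List Int) :
    scatter xs = (List.range 10).map (fun j => pickAbs xs 0 j) := by
  rw [scatter, show (0 : Int) = ((0 : Nat) : Int) from rfl,
      scatter_inv xs 0 (List.replicate 10 []) (by simp)]
  refine List.map_congr_left ?_
  intro j hj
  have hj10 : j < 10 := by simpa using hj
  rw [List.getD_eq_getElem?_getD, List.getElem?_replicate]
  simp [hj10]

lemma bucket_eq (xs : List Int) (i : Int) (j : Nat) (hij : i = j) (hj : j < 10) :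
    pyStrideSlice xs i = pickAbs xs 0 j := by
  rw [hij, pyStrideSlice_eq_strided xs j hj, pickAbs_eq_strided xs 0 j hj]
  congr 1
  omega

lemma pyRange_ten : PySem.List.pyRange 0 10 1 = [0,1,2,3,4,5,6,7,8,9] := by decide

lemma list_side (xs : List Int) :
    [pyStrideSlice xs 0, pyStrideSlice xs 1, pyStrideSlice xs 2, pyStrideSlice xs 3,
     pyStrideSlice xs 4, pyStrideSlice xs 5, pyStrideSlice xs 6, pyStrideSlice xs 7,
     pyStrideSlice xs 8, pyStrideSlice xs 9] = scatter xs := by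
  rw [scatter_eq]
  simp only [List.range_succ, List.map_cons, List.map_nil,
    List.range_zero, List.nil_append, List.cons_append]
  rw [bucket_eq xs 0 0 (by norm_num) (by omega), bucket_eq xs 1 1 (by norm_num) (by omega),
      bucket_eq xs 2 2 (by norm_num) (by omega), bucket_eq xs 3 3 (by norm_num) (by omega),
      bucket_eq xs 4 4 (by norm_num) (by omega), bucket_eq xs 5 5 (by norm_num) (by omega),
      bucket_eq xs 6 6 (by norm_num) (by omega), bucket_eq xs 7 7 (by norm_num) (by omega),
      bucket_eq xs 8 8 (by norm_num) (by omega), bucket_eq xs 9 9 (by norm_num) (by omega)]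

-- ===== VERDICT (by name: the statement is the Claim_ definition above) =====
theorem create_buckets_spec : Claim_equal_create_buckets := by
  intro vector classes _
  show create_buckets vector classes = create_buckets_alt vector classes
  rw [create_buckets, create_buckets_alt, pyRange_ten]
  simp only [List.foldl_cons, List.foldl_nil, List.nil_append, List.cons_append]
  exact Prod.ext (list_side vector) (list_side classes)
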